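-- pv_equiv track=rewrite | github.com/christianjgentry/knucklebones | knucklebones.py | scoreColumn
-- ===== SOURCE A (Python) =====
-- def scoreColumn(playerColumn):
--
--     count1 = []
--     count2 = []
--     count3 = []
--
--     for i in playerColumn:
--         if isinstance(i, int):
--             count = playerColumn.count(i)
--
--             if count == 1:
--                 count1.append(i)
--             elif count == 2:
--                 count2.append(i)
--             elif count == 3:
--                 count3.append(i)
--
--     calcCount1 = sum(count1)
--     calcCount2 = sum(count2) * 2
--     calcCount3 = sum(count3) * 3
--
--     calcList = [calcCount1, calcCount2, calcCount3]
--
--     calcTotal = sum(calcList)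
--
--     return calcTotal
-- ===== SOURCE B (Python) =====
-- def scoreColumn(playerColumn):
--     s = sorted(x for x in playerColumn if isinstance(x, int))
--     total = 0
--     while s:
--         v = s[0]
--         c = 1
--         while c < len(s) and s[c] == v:
--             c += 1
--         if c <= 3:
--             total += v * c * c
--         s = s[c:]
--     return total
-- ===== Notes on version B (the rewrite author's own statement) =====
-- stated objective: faster
-- what changed: A rescans the whole list with .count for every element and keeps three bucket lists; B sorts once and does a single run-length walk over the sorted list, adding v*c*c for each run of length c<=3.
import Mathlib
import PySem

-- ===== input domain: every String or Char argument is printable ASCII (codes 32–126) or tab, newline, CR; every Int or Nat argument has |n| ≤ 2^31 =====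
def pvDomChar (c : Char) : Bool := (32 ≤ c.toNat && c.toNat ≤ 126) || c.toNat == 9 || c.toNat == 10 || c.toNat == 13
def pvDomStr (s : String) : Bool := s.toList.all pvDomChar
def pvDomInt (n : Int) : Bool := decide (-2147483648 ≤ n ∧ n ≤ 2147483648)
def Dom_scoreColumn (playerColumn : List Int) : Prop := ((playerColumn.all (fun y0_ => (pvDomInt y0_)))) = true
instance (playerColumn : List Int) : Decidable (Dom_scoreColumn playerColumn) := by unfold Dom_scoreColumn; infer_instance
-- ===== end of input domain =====

-- B replaces A's per-element full-list .count rescans and three bucket lists with one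
-- sort followed by a single run-length walk (each run of value v, length c ≤ 3 adds v*c*c): faster.

-- ===== PORT A =====
-- the body of A's for-loop (isinstance(i, int) is always true for a List Int)
def pvStepA (playerColumn : List Int) (s : List Int × List Int × List Int) (i : Int) :
    List Int × List Int × List Int :=
  let count := PySem.List.count playerColumn i
  if count = 1 then (s.1 ++ [i], s.2.1, s.2.2)
  else if count = 2 then (s.1, s.2.1 ++ [i], s.2.2)
  else if count = 3 then (s.1, s.2.1, s.2.2 ++ [i])
  else s

def scoreColumn (playerColumn : List Int) : Int :=
  let st := playerColumn.foldl (pvStepA playerColumn) ([], [], [])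
  let calcCount1 := st.1.sum
  let calcCount2 := st.2.1.sum * 2
  let calcCount3 := st.2.2.sum * 3
  let calcList := [calcCount1, calcCount2, calcCount3]
  calcList.sum

-- ===== PORT B =====
-- the outer while of Source B: head v, inner while = run length c = 1 + takeWhile, s = s[c:] = dropWhile
def pvRuns (s : List Int) : Int :=
  match s with
  | [] => 0
  | v :: rest =>
    let c : Int := 1 + (rest.takeWhile (· == v)).length
    (if c ≤ 3 then v * c * c else 0) + pvRuns (rest.dropWhile (· == v))
termination_by s.length
decreasing_by
  simp only [List.length_cons]
  exact Nat.lt_succ_of_le (List.length_dropWhile_le _ rest)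

def scoreColumn_alt (playerColumn : List Int) : Int :=
  pvRuns (PySem.List.sorted playerColumn (fun x => x) false)

-- ===== PRECONDITION & SPEC =====
def Spec_scoreColumn (playerColumn : List Int) (out : Int) : Prop := out = scoreColumn_alt playerColumn
instance (playerColumn : List Int) (out : Int) : Decidable (Spec_scoreColumn playerColumn out) := by unfold Spec_scoreColumn; infer_instance

-- ===== CLAIM (what is proved, stated in full; the proofs are below) =====
def Claim_equal_scoreColumn : Prop := ∀ (playerColumn : List Int), Dom_scoreColumn playerColumn → Spec_scoreColumn playerColumn (scoreColumn playerColumn)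

-- ===== LEMMAS AND PROOFS =====

-- per-occurrence score: i times its multiplicity in l, gated at multiplicity ≤ 3
def pvF (l : List Int) (i : Int) : Int :=
  if l.count i = 1 then i
  else if l.count i = 2 then 2 * i
  else if l.count i = 3 then 3 * i
  else 0

def pvM (s : List Int × List Int × List Int) : Int :=
  s.1.sum + s.2.1.sum * 2 + s.2.2.sum * 3

theorem pvM_foldl (l : List Int) (xs : List Int) (s : List Int × List Int × List Int) :
    pvM (xs.foldl (pvStepA l) s) = pvM s + (xs.map (pvF l)).sum := by
  induction xs generalizing s with
  | nil => simp
  | cons x xs ih =>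
    simp only [List.foldl_cons, List.map_cons, List.sum_cons, ih]
    have : pvM (pvStepA l s x) = pvM s + pvF l x := by
      unfold pvStepA pvF pvM
      simp only [PySem.List.count_eq]
      split_ifs <;> simp <;> ring
    rw [this]; ring

theorem scoreColumn_eq_sum (l : List Int) :
    scoreColumn l = (l.map (pvF l)).sum := by
  have h := pvM_foldl l l ([], [], [])
  unfold pvM at h
  simp only [List.sum_nil] at h
  simp only [scoreColumn, List.sum_cons, List.sum_nil]
  omega


theorem pvRuns_eq_sum (l : List Int) :
    l.Pairwise (· ≤ ·) → pvRuns l = (l.map (pvF l)).sum := by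
  induction l using pvRuns.induct with
  | case1 => intro _; simp [pvRuns]
  | case2 v rest ih =>
    intro hs
    set t := rest.takeWhile (· == v) with ht
    set d := rest.dropWhile (· == v) with hd
    have hrest : rest = t ++ d := (rest.takeWhile_append_dropWhile (p := (· == v))).symm
    have htv : ∀ x ∈ t, x = v := by
      intro x hx
      have := List.mem_takeWhile_imp hx
      simpa using this
    have hdsub : d.Sublist rest := rest.dropWhile_sublist _
    have hdsort : d.Pairwise (· ≤ ·) := (List.Pairwise.sublist hdsub (List.pairwise_cons.mp hs).2)
    have hvle : ∀ x ∈ rest, v ≤ x := (List.pairwise_cons.mp hs).1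
    have hvd : v ∉ d := by
      intro hv
      match hdm : d, hv with
      | w :: d', hv =>
        have hw : ¬ (w == v) = true := by
          have := List.head?_dropWhile_not (p := (· == v)) rest
          rw [← hd] at this
          simpa using this
        have hwv : w ≠ v := by simpa using hw
        have hwrest : w ∈ rest := hdsub.mem List.mem_cons_self
        have h1 : v ≤ w := hvle w hwrest
        have hdsort' : List.Pairwise (fun a b : Int => a ≤ b) (w :: d') := hdm ▸ hdsort
        rcases List.mem_cons.mp hv with heq | hv'
        · exact hwv heq.symm
        · have h2 : w ≤ v := (List.pairwise_cons.mp hdsort').1 v hv'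
          exact hwv (le_antisymm h2 h1)
    -- count of v in the whole list is 1 + |t|
    have hcv : (v :: rest).count v = 1 + t.length := by
      have h1 : t.count v = t.length := List.count_eq_length.mpr (fun x hx => by
        simpa using (htv x hx).symm)
      have h2 : d.count v = 0 := List.count_eq_zero.mpr hvd
      rw [hrest, List.count_cons_self, List.count_append, h1, h2]
      omega
    -- counts of elements of d are unchanged by dropping the run
    have hcd : ∀ x ∈ d, (v :: rest).count x = d.count x := by
      intro x hx
      have hxv : x ≠ v := fun h => hvd (h ▸ hx)
      rw [hrest]
      simp [List.count_append, Ne.symm hxv,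
        List.count_eq_zero.mpr (fun h => hxv (htv x h))]
    have hfd : ∀ x ∈ d, pvF (v :: rest) x = pvF d x := by
      intro x hx; unfold pvF; rw [hcd x hx]
    -- sum over the head run
    have hrunsum : (((v :: t)).map (pvF (v :: rest))).sum
        = (1 + (t.length : Int)) * pvF (v :: rest) v := by
      have : (v :: t).map (pvF (v :: rest)) = List.replicate (1 + t.length) (pvF (v :: rest) v) := by
        rw [List.eq_replicate_iff]
        constructor
        · simp only [List.length_map, List.length_cons]; omega
        · intro b hb
          simp only [List.mem_map, List.mem_cons] at hb
          obtain ⟨x, hx | hx, rfl⟩ := hb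
          · rw [hx]
          · rw [htv x hx]
      rw [this, List.sum_replicate, nsmul_eq_mul]
      push_cast; ring
    have hrunscore : (1 + (t.length : Int)) * pvF (v :: rest) v
        = (if (1 + (t.length : Int)) ≤ 3 then v * (1 + (t.length : Int)) * (1 + (t.length : Int)) else 0) := by
      unfold pvF
      rw [hcv]
      rcases (by omega : t.length = 0 ∨ t.length = 1 ∨ t.length = 2 ∨ 3 ≤ t.length) with h | h | h | h
      · norm_num [h]
      · norm_num [h]; ring
      · norm_num [h]; ring
      · rw [if_neg (by omega), if_neg (by omega), if_neg (by omega),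
          if_neg (by omega)]
        ring
    have hih : pvRuns d = (d.map (pvF d)).sum := ih hdsort
    have hmapd : d.map (pvF d) = d.map (pvF (v :: rest)) :=
      (List.map_congr_left (fun x hx => (hfd x hx).symm))
    have hlist : (v :: rest) = (v :: t) ++ d := by rw [hrest]; rfl
    have hsplit := congrArg (fun xs : List Int => (xs.map (pvF (v :: rest))).sum) hlist
    simp only [List.map_append, List.sum_append] at hsplit
    rw [pvRuns]
    simp only [← ht, ← hd]
    rw [hih, hmapd, hsplit, hrunsum, hrunscore]

theorem pvF_congr_perm (l l' : List Int) (h : l.Perm l') (x : Int) : pvF l x = pvF l' x := by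
  unfold pvF; rw [h.count_eq]

-- ===== VERDICT (by name: the statement is the Claim_ definition above) =====
theorem scoreColumn_spec : Claim_equal_scoreColumn := by
  intro l _
  unfold Spec_scoreColumn scoreColumn_alt
  have hperm : (PySem.List.sorted l (fun x => x) false).Perm l := PySem.List.sorted_perm l (fun x => x) false
  have hsort : (PySem.List.sorted l (fun x => x) false).Pairwise (· ≤ ·) := by
    have := PySem.List.sorted_pairwise (xs := l) (key := fun x => x)
    simpa using this
  rw [scoreColumn_eq_sum, pvRuns_eq_sum _ hsort]
  have : (PySem.List.sorted l (fun x => x) false).map (pvF (PySem.List.sorted l (fun x => x) false))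
      = (PySem.List.sorted l (fun x => x) false).map (pvF l) :=
    List.map_congr_left (fun x _ => pvF_congr_perm _ _ hperm x)
  rw [this]
  exact (List.Perm.sum_eq (hperm.map (pvF l))).symm
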